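-- pv_equiv track=rewrite | github.com/uummoo/mu | mu/utils/tools.py | make_growing_series_with_sum_n
-- ===== SOURCE A (Python) =====
-- def make_growing_series_with_sum_n(requested_sum: int) -> tuple:
--     ls = []
--     add_idx = iter([])
--     while sum(ls) < requested_sum:
--         try:
--             ls[next(add_idx)] += 1
--         except StopIteration:
--             ls = [1] + ls
--             add_idx = reversed(tuple(range(len(ls))))
--     return tuple(ls)
-- ===== SOURCE B (Python) =====
-- def make_growing_series_with_sum_n(requested_sum: int) -> tuple:
--     # closed form: largest k with T_k <= n, then bump the last r = n - T_k elements of 1..k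
--     if requested_sum <= 0:
--         return ()
--     k, tri = 0, 0
--     while tri + k + 1 <= requested_sum:
--         k += 1
--         tri += k
--     r = requested_sum - tri
--     return tuple(i + 1 if i > k - r else i for i in range(1, k + 1))
-- ===== Notes on version B (the rewrite author's own statement) =====
-- stated objective: faster
-- what changed: Replaced the simulate-every-increment loop (which re-sums the list each iteration) by the closed form: find the largest k with T_k <= n in O(sqrt n) steps, then build [1..k] with the last n - T_k elements incremented.
import Mathlib
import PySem

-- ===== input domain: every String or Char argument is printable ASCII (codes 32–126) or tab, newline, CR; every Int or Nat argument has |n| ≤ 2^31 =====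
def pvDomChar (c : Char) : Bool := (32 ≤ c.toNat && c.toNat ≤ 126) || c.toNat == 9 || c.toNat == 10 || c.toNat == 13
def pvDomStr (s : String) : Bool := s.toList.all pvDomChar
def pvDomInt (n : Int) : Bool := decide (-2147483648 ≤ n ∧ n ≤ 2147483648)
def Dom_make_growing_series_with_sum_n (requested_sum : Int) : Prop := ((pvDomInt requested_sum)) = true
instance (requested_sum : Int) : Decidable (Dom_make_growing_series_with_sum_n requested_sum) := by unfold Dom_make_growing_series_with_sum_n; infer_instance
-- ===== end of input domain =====

-- B replaces A's simulate-every-increment loop by the triangular-number closed form (faster, asymptotic in a timing run).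


-- ===== PORT A =====
-- ls[i] += 1 on an in-range index (A's indices always come from range(len(ls)))
def pvIncAt : List Int → Nat → List Int
  | [], _ => []
  | x :: xs, 0 => (x + 1) :: xs
  | x :: xs, Nat.succ k => x :: pvIncAt xs k

-- the while loop of A; each iteration raises sum(ls) by 1, so fuel requested_sum.toNat
-- makes the recursion total without changing the computed value
def pvLoopA (n : Int) : Nat → List Int → List Nat → List Int
  | 0, ls, _ => ls
  | fuel + 1, ls, idx =>
    if ls.sum < n then
      match idx with
      | i :: rest => pvLoopA n fuel (pvIncAt ls i) rest
      | [] =>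
        let ls' := 1 :: ls
        pvLoopA n fuel ls' (List.range ls'.length).reverse
    else ls

def make_growing_series_with_sum_n (requested_sum : Int) : List Int :=
  pvLoopA requested_sum requested_sum.toNat [] []

-- ===== PORT B =====
-- while tri + k + 1 <= n: k += 1; tri += k
def pvFindK (n : Int) (k : Nat) (tri : Int) : Nat × Int :=
  if h : tri + (k : Int) + 1 ≤ n then pvFindK n (k + 1) (tri + ((k : Int) + 1)) else (k, tri)
  termination_by (n - tri).toNat
  decreasing_by omega

def make_growing_series_with_sum_n_alt (requested_sum : Int) : List Int :=
  if requested_sum ≤ 0 then []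
  else
    let p := pvFindK requested_sum 0 0
    let r := requested_sum - p.2
    (PySem.List.pyRange 1 ((p.1 : Int) + 1) 1).map
      (fun i => if i > (p.1 : Int) - r then i + 1 else i)

-- ===== PRECONDITION & SPEC =====
def Spec_make_growing_series_with_sum_n (requested_sum : Int) (out : List Int) : Prop := out = make_growing_series_with_sum_n_alt requested_sum
instance (requested_sum : Int) (out : List Int) : Decidable (Spec_make_growing_series_with_sum_n requested_sum out) := by unfold Spec_make_growing_series_with_sum_n; infer_instance

-- ===== CLAIM (what is proved, stated in full; the proofs are below) =====
def Claim_equal_make_growing_series_with_sum_n : Prop := ∀ (requested_sum : Int), Dom_make_growing_series_with_sum_n requested_sum → Spec_make_growing_series_with_sum_n requested_sum (make_growing_series_with_sum_n requested_sum)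

-- ===== LEMMAS AND PROOFS =====

-- T k = k (k+1) / 2 as a recursion
def pvTri : Nat → Int
  | 0 => 0
  | k + 1 => pvTri k + (k + 1)

-- the common intermediate shape: [1..k] with the last r elements incremented
def pvGen (k : Nat) (r : Int) : List Int :=
  (List.range k).map (fun (j : Nat) => if (k : Int) - r ≤ (j : Int) then ((j : Int) + 2) else ((j : Int) + 1))

theorem pvGen_length (k : Nat) (r : Int) : (pvGen k r).length = k := by
  simp [pvGen]

theorem pvIncAt_length (l : List Int) (i : Nat) : (pvIncAt l i).length = l.length := by
  induction l generalizing i with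
  | nil => rfl
  | cons x xs ih => cases i <;> simp [pvIncAt, ih]

theorem pvIncAt_getElem (l : List Int) (i j : Nat) (hj : j < l.length) :
    (pvIncAt l i)[j]'(by rw [pvIncAt_length]; exact hj) = if j = i then l[j] + 1 else l[j] := by
  induction l generalizing i j with
  | nil => simp at hj
  | cons x xs ih =>
    cases i with
    | zero => cases j <;> simp [pvIncAt]
    | succ k =>
      cases j with
      | zero => simp [pvIncAt]
      | succ m =>
        have hm : m < xs.length := by simpa using hj
        simp only [pvIncAt, List.getElem_cons_succ]
        rw [ih k m hm]
        by_cases h : m = k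
        · simp [h]
        · simp [h]

theorem pvIncAt_sum (l : List Int) (i : Nat) (h : i < l.length) :
    (pvIncAt l i).sum = l.sum + 1 := by
  induction l generalizing i with
  | nil => simp at h
  | cons x xs ih =>
    cases i with
    | zero => simp [pvIncAt]; ring
    | succ k =>
      simp only [pvIncAt, List.sum_cons]
      rw [ih k (by simpa using h)]
      ring

theorem pvGen_zero_sum (k : Nat) : (pvGen k 0).sum = pvTri k := by
  induction k with
  | zero => rfl
  | succ k ih =>
    unfold pvGen at ih ⊢
    rw [List.range_succ, List.map_append, List.sum_append]
    have : ((List.range k).map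
        (fun (j : Nat) => if (((k : Nat) + 1 : Nat) : Int) - 0 ≤ (j : Int) then ((j : Int) + 2) else ((j : Int) + 1)))
        = ((List.range k).map
        (fun (j : Nat) => if (k : Int) - 0 ≤ (j : Int) then ((j : Int) + 2) else ((j : Int) + 1))) := by
      apply List.map_congr_left
      intro j hj
      rw [List.mem_range] at hj
      split_ifs <;> omega
    rw [this, ih]
    simp only [List.map_cons, List.map_nil, List.sum_cons, List.sum_nil, pvTri]
    rw [if_neg (by omega : ¬ (((k : Nat) + 1 : Nat) : Int) - 0 ≤ (k : Int))]
    ring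

theorem pvIncAt_pvGen (k : Nat) (r : Int) (h0 : 0 ≤ r) (hr : r < k) :
    pvIncAt (pvGen k r) (k - 1 - r.toNat) = pvGen k (r + 1) := by
  apply List.ext_getElem
  · rw [pvIncAt_length, pvGen_length, pvGen_length]
  · intro j h1 h2
    rw [pvIncAt_getElem _ _ _ (by rw [pvGen_length]; simpa [pvGen_length] using h2)]
    have hj : j < k := by simpa [pvIncAt_length, pvGen_length] using h1
    simp only [pvGen, List.getElem_map, List.getElem_range]
    split_ifs <;> omega

theorem pvGen_sum (k : Nat) (r : Int) (h0 : 0 ≤ r) (hk : r ≤ k) :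
    (pvGen k r).sum = pvTri k + r := by
  -- induct on r.toNat via strong recursion on the integer r ≥ 0
  obtain ⟨m, rfl⟩ : ∃ m : Nat, r = (m : Int) := ⟨r.toNat, by omega⟩
  induction m with
  | zero => simpa using pvGen_zero_sum k
  | succ m ih =>
    have hm : (m : Int) < k := by push_cast at hk ⊢; omega
    have := pvIncAt_pvGen k m (by positivity) hm
    have hlen : k - 1 - (m : Int).toNat < (pvGen k m).length := by
      rw [pvGen_length]; omega
    calc (pvGen k ((m : Int) + 1)).sum
        = (pvIncAt (pvGen k m) (k - 1 - (m : Int).toNat)).sum := by rw [this]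
      _ = (pvGen k m).sum + 1 := pvIncAt_sum _ _ hlen
      _ = pvTri k + ((m : Int) + 1) := by
          rw [ih (by positivity) (by omega)]; ring

theorem pvGen_succ_refill (k : Nat) :
    (1 : Int) :: pvGen k k = pvGen (k + 1) 0 := by
  apply List.ext_getElem
  · simp [pvGen_length]
  · intro j h1 h2
    cases j with
    | zero =>
      simp [pvGen, List.getElem_map]
    | succ m =>
      have hm : m < k := by simpa [pvGen_length] using h1
      simp only [List.getElem_cons_succ, pvGen, List.getElem_map, List.getElem_range]
      split_ifs <;> push_cast <;> omega

theorem pvFindK_step (n : Int) (k : Nat) (h : pvTri (k + 1) ≤ n) :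
    pvFindK n k (pvTri k) = pvFindK n (k + 1) (pvTri (k + 1)) := by
  have hc : pvTri k + (k : Int) + 1 ≤ n := by
    simp only [pvTri] at h; omega
  have ht : pvTri k + ((k : Int) + 1) = pvTri (k + 1) := by
    simp only [pvTri]
  rw [pvFindK, dif_pos hc, ht]

theorem pvFindK_stop (n : Int) (k : Nat) (h : ¬ pvTri k + (k : Int) + 1 ≤ n) :
    pvFindK n k (pvTri k) = (k, pvTri k) := by
  rw [pvFindK]
  simp [h]

-- main loop characterisation of port A, relating its state to B's search resumed at k
theorem pvLoopA_char (n : Int) (fuel : Nat) : ∀ (k : Nat) (r : Int), 0 ≤ r → r ≤ k →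
    n = pvTri k + r + fuel →
    pvLoopA n fuel (pvGen k r) (List.range (k - r.toNat)).reverse =
      pvGen (pvFindK n k (pvTri k)).1 (n - (pvFindK n k (pvTri k)).2) := by
  induction fuel with
  | zero =>
    intro k r h0 hk hn
    have hstop : ¬ pvTri k + (k : Int) + 1 ≤ n := by omega
    rw [pvFindK_stop n k hstop]
    simp only [pvLoopA]
    congr 1
    omega
  | succ fuel ih =>
    intro k r h0 hk hn
    have hsum : (pvGen k r).sum < n := by rw [pvGen_sum k r h0 hk]; omega
    by_cases hr : r < k
    · -- next(add_idx) succeeds: increment element k-1-r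
      have hkr : k - r.toNat = (k - 1 - r.toNat) + 1 := by omega
      rw [hkr, List.range_succ, List.reverse_append]
      simp only [pvLoopA, hsum, if_true, List.reverse_cons, List.reverse_nil,
        List.nil_append, List.cons_append]
      rw [pvIncAt_pvGen k r h0 hr]
      have hsh : (k - 1 - r.toNat) = k - (r + 1).toNat := by omega
      rw [hsh]
      exact ih k (r + 1) (by omega) (by omega) (by omega)
    · -- StopIteration: prepend 1, refill the reversed index iterator
      have hrk : r = (k : Int) := by omega
      subst hrk
      have hz : k - ((k : Int)).toNat = 0 := by omega
      rw [hz]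
      simp only [pvLoopA, hsum, if_true, List.range_zero, List.reverse_nil]
      have hTn : pvTri (k + 1) ≤ n := by simp only [pvTri]; omega
      rw [pvFindK_step n k hTn, pvGen_succ_refill k]
      rw [show (pvGen (k + 1) 0).length = (k + 1) - (0 : Int).toNat from by
        simp [pvGen_length]]
      refine ih (k + 1) 0 le_rfl (by omega) ?_
      simp only [pvTri] at hn ⊢
      push_cast at hn ⊢
      omega

-- B's output is the same closed-form list
theorem alt_eq_pvGen (n : Int) (hn : 1 ≤ n) :
    make_growing_series_with_sum_n_alt n =
      pvGen (pvFindK n 0 0).1 (n - (pvFindK n 0 0).2) := by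
  have key : ∀ (k : Nat) (t : Int),
      (PySem.List.pyRange 1 ((k : Int) + 1) 1).map
          (fun i => if i > (k : Int) - (n - t) then i + 1 else i)
        = pvGen k (n - t) := by
    intro k t
    rw [PySem.List.pyRange_one]
    have hk : (((k : Int) + 1) - 1).toNat = k := by omega
    rw [hk, List.map_map, pvGen]
    apply List.map_congr_left
    intro j hj
    rw [List.mem_range] at hj
    simp only [Function.comp]
    split_ifs <;> omega
  unfold make_growing_series_with_sum_n_alt
  rw [if_neg (by omega)]
  exact key (pvFindK n 0 0).1 (pvFindK n 0 0).2

-- ===== VERDICT (by name: the statement is the Claim_ definition above) =====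
theorem make_growing_series_with_sum_n_spec : Claim_equal_make_growing_series_with_sum_n := by
  intro n _
  unfold Spec_make_growing_series_with_sum_n
  by_cases hn : n ≤ 0
  · have h0 : n.toNat = 0 := by omega
    unfold make_growing_series_with_sum_n make_growing_series_with_sum_n_alt
    rw [h0, if_pos hn]
    rfl
  · have h1 : 1 ≤ n := by omega
    have hstart : make_growing_series_with_sum_n n =
        pvLoopA n n.toNat (pvGen 0 0) (List.range (0 - (0:Int).toNat)).reverse := rfl
    rw [hstart, pvLoopA_char n n.toNat 0 0 le_rfl (by omega) (by simp [pvTri]; omega),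
      alt_eq_pvGen n h1]
    rfl
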